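-- pv_equiv track=rewrite | github.com/Jv131103/estudos_python | estudos2/soma_circular_eficiente.py | gerar_lista_circular
-- ===== SOURCE A (Python) =====
-- def gerar_lista_circular(lista):
--     if not lista:
--         return []
--
--     resultado = []
--     n = len(lista)
--
--     for i in range(n - 1):
--         resultado.append(lista[i] + lista[i + 1])
--
--     resultado.append(lista[-1] + lista[0])
--     return resultado
-- ===== SOURCE B (Python) =====
-- def gerar_lista_circular(lista):
--     if not lista:
--         return []
--     out = []
--     seguinte = lista[0]
--     for x in reversed(lista):
--         out.append(x + seguinte)
--         seguinte = x
--     out.reverse()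
--     return out
-- ===== Notes on version B (the rewrite author's own statement) =====
-- stated objective: alternative
-- what changed: Builds the result back-to-front: one pass over the reversed list carrying each element's circular successor in an accumulator, so the wrap-around sum is produced first by the same uniform step and there is no index arithmetic or separate final append; the output is reversed at the end.
import Mathlib
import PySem

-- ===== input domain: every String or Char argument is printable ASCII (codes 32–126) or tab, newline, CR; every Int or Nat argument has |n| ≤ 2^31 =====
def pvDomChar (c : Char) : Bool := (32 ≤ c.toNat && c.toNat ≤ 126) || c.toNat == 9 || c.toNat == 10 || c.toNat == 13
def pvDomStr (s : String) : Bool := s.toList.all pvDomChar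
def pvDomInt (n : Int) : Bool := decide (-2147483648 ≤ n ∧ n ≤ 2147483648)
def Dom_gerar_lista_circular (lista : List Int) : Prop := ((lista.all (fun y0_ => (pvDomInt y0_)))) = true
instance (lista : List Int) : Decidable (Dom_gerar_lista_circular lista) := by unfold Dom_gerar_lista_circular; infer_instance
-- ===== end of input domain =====

-- B builds the result back-to-front over the reversed list, carrying each element's circular successor, then reverses (alternative decomposition).

-- ===== PORT A =====
-- pyGetD is exact here: every index the loop uses (0..n-2, i+1 ≤ n-1, and -1 on a nonempty list) is in range.
def gerar_lista_circular (lista : List Int) : List Int :=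
  if lista = [] then []
  else
    let n : Int := PySem.List.len lista
    let resultado := (PySem.List.pyRange 0 (n - 1) 1).foldl
      (fun acc i => acc ++ [PySem.List.pyGetD lista i 0 + PySem.List.pyGetD lista (i + 1) 0]) []
    resultado ++ [PySem.List.pyGetD lista (-1) 0 + PySem.List.pyGetD lista 0 0]

-- ===== PORT B =====
-- Source B's loop 'for x in reversed(lista)' with state (out, seguinte) is a foldl over lista.reverse;
-- the final out.reverse() is .reverse at the end.
def gerar_lista_circular_alt (lista : List Int) : List Int :=
  match lista with
  | [] => []
  | x :: _ =>
    let fin := lista.reverse.foldl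
      (fun (p : List Int × Int) v => (p.1 ++ [v + p.2], v)) ([], x)
    fin.1.reverse

-- ===== PRECONDITION & SPEC =====
def Spec_gerar_lista_circular (lista : List Int) (out : List Int) : Prop := out = gerar_lista_circular_alt lista
instance (lista : List Int) (out : List Int) : Decidable (Spec_gerar_lista_circular lista out) := by unfold Spec_gerar_lista_circular; infer_instance

-- ===== CLAIM (what is proved, stated in full; the proofs are below) =====
def Claim_equal_gerar_lista_circular : Prop := ∀ (lista : List Int), Dom_gerar_lista_circular lista → Spec_gerar_lista_circular lista (gerar_lista_circular lista)

-- ===== LEMMAS AND PROOFS =====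

-- A's loop body (adjacent sums by index) is the zip of the list with its own tail.
lemma adj_sums (l : List Int) :
    (List.range (l.length - 1)).map (fun k => l.getD k 0 + l.getD (k + 1) 0)
      = List.zipWith (fun a b => a + b) l (l.drop 1) := by
  induction l with
  | nil => simp
  | cons a t ih =>
    cases t with
    | nil => simp
    | cons b bs =>
      have h : (a :: b :: bs : List Int).length - 1 = ((b :: bs : List Int).length - 1) + 1 := by
        simp
      rw [h, List.range_succ_eq_map, List.map_cons, List.map_map]
      simp only [List.drop_succ_cons, List.drop_zero, List.zipWith_cons_cons]
      refine congrArg₂ _ (by simp) ?_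
      simp only [List.drop_succ_cons, List.drop_zero] at ih
      rw [← ih]
      refine List.map_congr_left (fun k _ => ?_)
      simp

-- Appending the wrap-around element to the second zip argument appends last + z to the result.
lemma zip_rot (xs : List Int) (a z : Int) :
    List.zipWith (fun a b => a + b) (a :: xs) (xs ++ [z])
      = List.zipWith (fun a b => a + b) (a :: xs) xs
        ++ [PySem.List.pyGetD (a :: xs) (-1) 0 + z] := by
  induction xs generalizing a with
  | nil =>
    rw [PySem.List.pyGetD_neg_one [a] 0 (by simp)]
    simp
  | cons y ys ih =>
    simp only [List.cons_append, List.zipWith_cons_cons]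
    rw [ih y]
    have : PySem.List.pyGetD (a :: y :: ys) (-1) 0 = PySem.List.pyGetD (y :: ys) (-1) 0 := by
      rw [PySem.List.pyGetD_neg_one (a :: y :: ys) 0 (by simp),
          PySem.List.pyGetD_neg_one (y :: ys) 0 (by simp)]
      simp [List.getLast_cons]
    rw [this]

-- B's successor-carrying fold (seen as a foldr) produces the reversed circular zip and ends carrying the head.
lemma fold_succ (ys : List Int) (y w : Int) :
    (y :: ys).foldr (fun v (p : List Int × Int) => (p.1 ++ [v + p.2], v)) ([], w)
      = ((List.zipWith (fun a b => a + b) (y :: ys) (ys ++ [w])).reverse, y) := by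
  induction ys generalizing y with
  | nil => simp
  | cons z zs ih =>
    rw [List.foldr_cons, ih z]
    simp

-- ===== VERDICT (by name: the statement is the Claim_ definition above) =====
theorem gerar_lista_circular_spec : Claim_equal_gerar_lista_circular := by
  intro lista _
  unfold Spec_gerar_lista_circular gerar_lista_circular gerar_lista_circular_alt
  cases lista with
  | nil => simp
  | cons x xs =>
    simp only [if_neg (List.cons_ne_nil x xs)]
    rw [PySem.List.foldl_append_singleton_eq_map]
    have hn : (PySem.List.len (x :: xs) : Int) - 1 = (xs.length : Int) := by
      simp [PySem.List.len]
    rw [hn, PySem.List.pyRange_zero_natCast, List.map_map]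
    have hmap : (List.range xs.length).map
        ((fun i => PySem.List.pyGetD (x :: xs) i 0 + PySem.List.pyGetD (x :: xs) (i + 1) 0)
          ∘ (fun k : Nat => (k : Int)))
        = (List.range ((x :: xs).length - 1)).map
            (fun k => (x :: xs).getD k 0 + (x :: xs).getD (k + 1) 0) := by
      simp only [List.length_cons, Nat.add_sub_cancel]
      refine List.map_congr_left (fun k _ => ?_)
      have hc : ((k : Int) + 1) = ((k + 1 : Nat) : Int) := by push_cast; ring
      show PySem.List.pyGetD (x :: xs) (k : Int) 0
            + PySem.List.pyGetD (x :: xs) ((k : Int) + 1) 0 = _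
      rw [hc, PySem.List.pyGetD_natCast, PySem.List.pyGetD_natCast]
    rw [hmap, adj_sums, PySem.List.pyGetD_zero_cons]
    rw [List.foldl_reverse, fold_succ]
    simp only [List.reverse_reverse]
    rw [zip_rot]
    simp
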